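-- pv_equiv track=rewrite | github.com/MohammedBounasr/Algorithmique2-Python | TP_EX/TP2_EX/EX2_6.py | spnm
-- ===== SOURCE A (Python) =====
-- def spnm (n):
--     i=1
--     j=1
--     s=0
--     while i <=n :
--         j+=1
--         if j%2==0 and j%3!=0 :
--             s+=j
--             i+=1
--     return s
-- ===== SOURCE B (Python) =====
-- def spnm(n):
--     # Closed form: the even numbers not divisible by 3 are 6m+2, 6m+4 (m = 0,1,...).
--     # Sum of the first n of them: with n = 2q + r, sum = 6*q*q + (6*q + 2 if r else 0).
--     if n <= 0:
--         return 0
--     q, r = divmod(n, 2)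
--     return 6 * q * q + (6 * q + 2 if r else 0)
-- ===== Notes on version B (the rewrite author's own statement) =====
-- stated objective: faster
-- what changed: Replaces the counting while-loop over candidate integers with an O(1) closed-form formula over the 6m+2, 6m+4 sequence.
import Mathlib
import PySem

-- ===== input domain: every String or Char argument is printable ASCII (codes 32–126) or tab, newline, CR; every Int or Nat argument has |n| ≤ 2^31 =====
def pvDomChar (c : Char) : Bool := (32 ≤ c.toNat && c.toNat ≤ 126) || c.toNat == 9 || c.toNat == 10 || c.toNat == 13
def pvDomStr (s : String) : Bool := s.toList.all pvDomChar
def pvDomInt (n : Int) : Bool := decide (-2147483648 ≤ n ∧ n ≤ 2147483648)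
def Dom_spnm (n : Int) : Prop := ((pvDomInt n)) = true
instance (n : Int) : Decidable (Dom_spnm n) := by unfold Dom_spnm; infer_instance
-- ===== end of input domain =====

-- B replaces A's counting while-loop by an O(1) closed-form formula over the 6m+2, 6m+4 sequence.

-- ===== PORT A =====
-- the loop's guard 'j % 2 == 0 and j % 3 != 0' as a Bool, exactly as Python evaluates it
def pvGood (j : Int) : Bool := PySem.Int.mod j 2 == 0 && PySem.Int.mod j 3 != 0

-- termination potential on the residue of j mod 6 (steps until the guard next accepts)
def pvPotN (r : Nat) : Nat :=
  if r = 1 ∨ r = 3 then 1 else if r = 0 ∨ r = 2 then 2 else if r = 5 then 3 else 4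

def pvPot (j : Int) : Nat := pvPotN ((j % 6).toNat)

-- ---- small omega-free facts the port's termination proof cites ----
theorem pvPotN_ge_one (r : Nat) : 1 ≤ pvPotN r := by
  unfold pvPotN; split_ifs <;> decide

theorem pvPotN_le_four (r : Nat) : pvPotN r ≤ 4 := by
  unfold pvPotN; split_ifs <;> decide

theorem pvGood_mod6 (x : Int) : pvGood (x % 6) = pvGood x := by
  unfold pvGood
  rw [PySem.Int.mod_eq_emod_of_pos (by decide), PySem.Int.mod_eq_emod_of_pos (by decide),
      PySem.Int.mod_eq_emod_of_pos (by decide), PySem.Int.mod_eq_emod_of_pos (by decide),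
      Int.emod_emod_of_dvd x ⟨3, by decide⟩, Int.emod_emod_of_dvd x ⟨2, by decide⟩]

theorem pvKeySkip : ∀ r < 6, ¬ pvGood ((((r + 1) % 6 : Nat)) : Int) = true →
    pvPotN ((r + 1) % 6) < pvPotN r := by decide

theorem pvResBound (j : Int) : ((j % 6).toNat : Int) = j % 6 ∧ (j % 6).toNat < 6 := by
  have hnn : 0 ≤ j % 6 := Int.emod_nonneg j (by decide)
  have hc : ((j % 6).toNat : Int) = j % 6 := Int.toNat_of_nonneg hnn
  refine ⟨hc, ?_⟩
  have hlt : j % 6 < 6 := Int.emod_lt_of_pos j (by decide)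
  exact_mod_cast hc ▸ hlt

theorem pvSuccRes (j : Int) : (j + 1) % 6 = ((((j % 6).toNat + 1) % 6 : Nat) : Int) := by
  rw [Int.add_emod, ← (pvResBound j).1]
  push_cast
  norm_num

theorem pvPot_dec_collect (n i j : Int) (h1 : i ≤ n) :
    (4 * (n + 1 - (i + 1))).toNat + pvPot (j + 1) < (4 * (n + 1 - i)).toNat + pvPot j := by
  have e1 : n + 1 - (i + 1) = n - i := add_sub_add_right_eq_sub n i 1
  have e2 : 4 * (n + 1 - i) = 4 * (n - i) + ((4 : Nat) : Int) := by
    rw [add_sub_right_comm n 1 i, mul_add, mul_one]; norm_num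
  have h4 : (0 : Int) ≤ 4 * (n - i) := mul_nonneg (by decide) (sub_nonneg.mpr h1)
  have e3 : (4 * (n + 1 - i)).toNat = (4 * (n - i)).toNat + 4 := by
    rw [e2, Int.toNat_add_nat h4 4]
  rw [e1, e3]
  have pb : 1 ≤ pvPot j := pvPotN_ge_one _
  have pb' : pvPot (j + 1) ≤ 4 := pvPotN_le_four _
  calc (4 * (n - i)).toNat + pvPot (j + 1)
      ≤ (4 * (n - i)).toNat + 4 := Nat.add_le_add_left pb' _
    _ < (4 * (n - i)).toNat + 4 + pvPot j := Nat.lt_add_of_pos_right pb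
    _ = (4 * (n - i)).toNat + 4 + pvPot j := rfl

theorem pvPot_dec_skip (n i j : Int) (h2 : ¬ pvGood (j + 1) = true) :
    (4 * (n + 1 - i)).toNat + pvPot (j + 1) < (4 * (n + 1 - i)).toNat + pvPot j := by
  apply Nat.add_lt_add_left
  have e : (j + 1) % 6 = ((((j % 6).toNat + 1) % 6 : Nat) : Int) := pvSuccRes j
  have g1 : pvGood ((((((j % 6).toNat + 1) % 6 : Nat)) : Int)) = pvGood (j + 1) := by
    rw [← e, pvGood_mod6]
  have p1 : pvPot (j + 1) = pvPotN (((j % 6).toNat + 1) % 6) := by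
    unfold pvPot; rw [e, Int.toNat_natCast]
  rw [p1]
  exact pvKeySkip _ (pvResBound j).2 (g1.symm ▸ h2)

def spnmLoop (n i j s : Int) : Int :=
  if i ≤ n then
    if pvGood (j + 1) then
      spnmLoop n (i + 1) (j + 1) (s + (j + 1))
    else
      spnmLoop n i (j + 1) s
  else s
termination_by (4 * (n + 1 - i)).toNat + pvPot j
decreasing_by
  · exact pvPot_dec_collect n i j ‹_›
  · exact pvPot_dec_skip n i j ‹_›

def spnm (n : Int) : Int := spnmLoop n 1 1 0

-- ===== PORT B =====
def spnm_alt (n : Int) : Int :=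
  if n ≤ 0 then 0
  else
    let q := PySem.Int.floordiv n 2
    let r := PySem.Int.mod n 2
    6 * q * q + (if r ≠ 0 then 6 * q + 2 else 0)

-- ===== PRECONDITION & SPEC =====
def Spec_spnm (n : Int) (out : Int) : Prop := out = spnm_alt n
instance (n : Int) (out : Int) : Decidable (Spec_spnm n out) := by unfold Spec_spnm; infer_instance

-- ===== CLAIM (what is proved, stated in full; the proofs are below) =====
def Claim_equal_spnm : Prop := ∀ (n : Int), Dom_spnm n → Spec_spnm n (spnm n)

-- ===== LEMMAS AND PROOFS =====

theorem pvMod2 (x : Int) : PySem.Int.mod x 2 = x % 2 :=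
  PySem.Int.mod_eq_emod_of_pos (by norm_num)

-- k-th collected value (k ≥ 1); pvT 0 = 1 is the loop's initial j
def pvT (k : Nat) : Int :=
  if k = 0 then 1 else if k % 2 = 1 then 3 * k - 1 else 3 * k - 2

-- sum of the first k collected values
def pvS (k : Nat) : Int :=
  6 * (k / 2 : Nat) * (k / 2 : Nat) + (if k % 2 = 1 then 6 * (k / 2 : Nat) + 2 else 0)

theorem pvS_succ (k : Nat) : pvS (k + 1) = pvS k + pvT (k + 1) := by
  unfold pvS pvT
  rcases Nat.even_or_odd k with ⟨m, hm⟩ | ⟨m, hm⟩ <;> subst hm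
  · have h1 : (m + m) / 2 = m := by omega
    have h2 : (m + m + 1) / 2 = m := by omega
    have h3 : (m + m) % 2 = 0 := by omega
    have h4 : (m + m + 1) % 2 = 1 := by omega
    have h5 : ¬ (m + m + 1 = 0) := by omega
    simp only [h1, h2, h3, h4, h5, if_false, if_pos]
    norm_num
    ring
  · have h1 : (2 * m + 1) / 2 = m := by omega
    have h2 : (2 * m + 1 + 1) / 2 = m + 1 := by omega
    have h3 : (2 * m + 1) % 2 = 1 := by omega
    have h4 : (2 * m + 1 + 1) % 2 = 0 := by omega
    have h5 : ¬ (2 * m + 1 + 1 = 0) := by omega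
    simp only [h1, h2, h3, h4, h5, if_false, if_pos]
    norm_num
    ring

theorem pvGood_iff (x : Int) : pvGood x = true ↔ (x % 2 = 0 ∧ x % 3 ≠ 0) := by
  simp [pvGood]

-- one collected term: from state (i = k+1, j = pvT k) the loop reaches (k+2, pvT (k+1))
theorem spnmLoop_step (k : Nat) (n s : Int) (h : (k : Int) + 1 ≤ n) :
    spnmLoop n ((k : Int) + 1) (pvT k) s
      = spnmLoop n ((k : Int) + 2) (pvT (k + 1)) (s + pvT (k + 1)) := by
  rcases Nat.eq_zero_or_pos k with hk | hk
  · subst hk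
    rw [spnmLoop]
    have : pvGood ((pvT 0) + 1) = true := by
      rw [pvGood_iff]; unfold pvT; norm_num
    simp only [if_pos h, if_pos this]
    norm_num [pvT]
  · rcases Nat.even_or_odd k with ⟨m, hm⟩ | ⟨m, hm⟩ <;> subst hm
    · -- k = 2m even, k ≥ 2: four loop iterations (skip, skip, skip, collect)
      have hm1 : 1 ≤ m := by omega
      have ht : pvT (m + m) = 6 * (m : Int) - 2 := by
        unfold pvT
        have h1 : (m + m) % 2 = 0 := by omega
        have hm0 : ¬ m = 0 := by omega
        simp [h1, hm0]
        ring
      have ht' : pvT (m + m + 1) = 6 * (m : Int) + 2 := by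
        unfold pvT
        have h1 : (m + m + 1) % 2 = 1 := by omega
        simp [h1]
        ring
      rw [ht, ht']
      set jm : Int := 6 * (m : Int) - 2 with hj
      have c1 : ¬ pvGood (jm + 1) = true := by
        rw [pvGood_iff, hj]; omega
      have c2 : ¬ pvGood (jm + 1 + 1) = true := by
        rw [pvGood_iff, hj]; omega
      have c3 : ¬ pvGood (jm + 1 + 1 + 1) = true := by
        rw [pvGood_iff, hj]; omega
      have c4 : pvGood (jm + 1 + 1 + 1 + 1) = true := by
        rw [pvGood_iff, hj]; omega
      rw [spnmLoop]; simp only [if_pos h, if_neg c1]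
      rw [spnmLoop]; simp only [if_pos h, if_neg c2]
      rw [spnmLoop]; simp only [if_pos h, if_neg c3]
      rw [spnmLoop]; simp only [if_pos h, if_pos c4]
      have e1 : jm + 1 + 1 + 1 + 1 = 6 * (m : Int) + 2 := by rw [hj]; ring
      rw [e1]
      congr 1
    · -- k = 2m+1 odd: two loop iterations (skip, collect)
      have ht : pvT (2 * m + 1) = 6 * (m : Int) + 2 := by
        unfold pvT
        have h1 : (2 * m + 1) % 2 = 1 := by omega
        simp [h1]
        ring
      have ht' : pvT (2 * m + 1 + 1) = 6 * (m : Int) + 4 := by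
        unfold pvT
        have h1 : (2 * m + 1 + 1) % 2 = 0 := by omega
        simp [h1]
        ring
      rw [ht, ht']
      set jm : Int := 6 * (m : Int) + 2 with hj
      have c1 : ¬ pvGood (jm + 1) = true := by
        rw [pvGood_iff, hj]; omega
      have c2 : pvGood (jm + 1 + 1) = true := by
        rw [pvGood_iff, hj]; omega
      rw [spnmLoop]; simp only [if_pos h, if_neg c1]
      rw [spnmLoop]; simp only [if_pos h, if_pos c2]
      have e1 : jm + 1 + 1 = 6 * (m : Int) + 4 := by rw [hj]; ring
      rw [e1]
      congr 1

theorem spnmLoop_main (r : Nat) : ∀ (k : Nat) (s : Int),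
    spnmLoop ((k : Int) + r) ((k : Int) + 1) (pvT k) s = s + pvS (k + r) - pvS k := by
  induction r with
  | zero =>
    intro k s
    rw [spnmLoop]
    have h0 : ¬ ((k : Int) + 1 ≤ (k : Int) + ((0 : Nat) : Int)) := by push_cast; omega
    rw [if_neg h0]
    simp
  | succ r ih =>
    intro k s
    have hle : (k : Int) + 1 ≤ (k : Int) + (r + 1 : Nat) := by push_cast; omega
    rw [spnmLoop_step k _ s hle]
    have hcast : (k : Int) + (r + 1 : Nat) = ((k + 1 : Nat) : Int) + r := by push_cast; ring
    have hcast2 : (k : Int) + 2 = ((k + 1 : Nat) : Int) + 1 := by push_cast; ring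
    rw [hcast, hcast2, ih (k + 1) (s + pvT (k + 1))]
    rw [pvS_succ]
    have : k + 1 + r = k + (r + 1) := by omega
    rw [this]
    ring

theorem spnm_alt_eq_pvS (n : Int) (hn : 1 ≤ n) : spnm_alt n = pvS n.toNat := by
  unfold spnm_alt pvS
  have h0 : ¬ n ≤ 0 := by omega
  simp only [h0, if_false]
  have hq : PySem.Int.floordiv n 2 = n / 2 := PySem.Int.floordiv_eq_ediv_of_pos (by norm_num)
  have hr : PySem.Int.mod n 2 = n % 2 := pvMod2 n
  have hq2 : n / 2 = ((n.toNat / 2 : Nat) : Int) := by omega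
  have hiff : (n % 2 ≠ 0) ↔ (n.toNat % 2 = 1) := by omega
  rw [hq, hr, hq2]
  by_cases hpar : n.toNat % 2 = 1
  · simp [hpar, hiff.mpr hpar]
  · have : n % 2 = 0 := by omega
    simp [hpar, this]

-- ===== VERDICT (by name: the statement is the Claim_ definition above) =====
theorem spnm_spec : Claim_equal_spnm := by
  intro n _
  unfold Spec_spnm spnm
  by_cases hn : n ≤ 0
  · rw [spnmLoop]
    have : ¬ (1 : Int) ≤ n := by omega
    simp [this, spnm_alt, hn]
  · have h1 : 1 ≤ n := by omega
    have hT0 : pvT 0 = 1 := by norm_num [pvT]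
    have hmain := spnmLoop_main n.toNat 0 0
    rw [hT0] at hmain
    have e1 : ((0 : Nat) : Int) + ((n.toNat : Nat) : Int) = n := by omega
    have e2 : ((0 : Nat) : Int) + 1 = 1 := by norm_num
    have e3 : 0 + n.toNat = n.toNat := by omega
    rw [e1, e2, e3] at hmain
    rw [hmain, spnm_alt_eq_pvS n h1]
    norm_num [pvS]
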